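-- pv_equiv track=rewrite | github.com/jaspercb/cec2020 | src/curve2.py | MakeCurve
-- ===== SOURCE A (Python) =====
-- def MakeCurve(w, h):
--     lim = int(w/2)
--     xss = list(range(0, lim))
--     xs = []
--
--     if h % 2 == 0:
--         xss = xss[::-1]
--
--     for x in range(h):
--         xs += xss
--         xss = xss[::-1]
--
--     xss = list(range(lim, w))
--     for x in range(h):
--         xs += xss
--         xss = xss[::-1]
--
--     ys = []
--     for y in range(0, h):
--         ys += [y] * lim
--     for y in reversed(range(0, h)):
--         ys += [y] * (w-lim)
--
--     assert(len(ys) == len(xs))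
--     return list(zip(ys, xs))
-- ===== SOURCE B (Python) =====
-- def MakeCurve(w, h):
--     # Closed form: each point is computed arithmetically from its flat index.
--     if w <= 0 or h <= 0:
--         return []
--     lim = w // 2
--     r = w - lim
--     out = []
--     ap = out.append
--     for i in range(h * lim):
--         y, x = divmod(i, lim)
--         ap((y, x) if (h + y) % 2 == 1 else (y, lim - 1 - x))
--     for k in range(h * r):
--         t, x = divmod(k, r)
--         y = h - 1 - t
--         ap((y, lim + x) if (h + y) % 2 == 1 else (y, w - 1 - x))
--     return out
-- ===== Notes on version B (the rewrite author's own statement) =====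
-- stated objective: alternative
-- what changed: B computes each curve point in closed form from its flat index (divmod gives the row and in-row offset, parity of h+y gives the direction), instead of A's staged construction of separate xs/ys lists by repeated slice reversal and a final zip.
import Mathlib
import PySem

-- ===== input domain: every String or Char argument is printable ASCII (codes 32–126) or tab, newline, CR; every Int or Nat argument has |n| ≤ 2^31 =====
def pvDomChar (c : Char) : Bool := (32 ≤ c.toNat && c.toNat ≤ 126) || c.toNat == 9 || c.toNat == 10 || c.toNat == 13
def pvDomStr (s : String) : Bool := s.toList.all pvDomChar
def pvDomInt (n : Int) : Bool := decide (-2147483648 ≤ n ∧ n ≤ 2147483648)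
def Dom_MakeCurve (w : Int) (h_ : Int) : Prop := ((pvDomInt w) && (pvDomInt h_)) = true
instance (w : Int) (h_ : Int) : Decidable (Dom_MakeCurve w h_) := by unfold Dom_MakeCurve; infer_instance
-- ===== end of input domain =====

-- B computes each curve point in closed form from its flat index (div/mod for row and offset,
-- parity of h + y for the direction) instead of A's staged xs/ys lists with repeated slice
-- reversal and a final zip (objective: alternative algorithm, same asymptotic cost).

-- ===== PORT A =====
-- int(w/2) on ints is truncating division (PySem.Int.truncdiv); xss[::-1] is List.reverse;
-- the assert always holds (it checks len(ys) == len(xs)).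
def MakeCurve (w : Int) (h_ : Int) : List (Int × Int) :=
  let lim := PySem.Int.truncdiv w 2
  let xss := PySem.List.pyRange 0 lim 1
  let xs : List Int := []
  let xss := if PySem.Int.mod h_ 2 = 0 then xss.reverse else xss
  let st := List.foldl (fun (st : List Int × List Int) _ => (st.1 ++ st.2, st.2.reverse))
      (xs, xss) (PySem.List.pyRange 0 h_ 1)
  let xs := st.1
  let xss2 := PySem.List.pyRange lim w 1
  let st2 := List.foldl (fun (st : List Int × List Int) _ => (st.1 ++ st.2, st.2.reverse))
      (xs, xss2) (PySem.List.pyRange 0 h_ 1)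
  let xs := st2.1
  let ys := List.foldl (fun acc y => acc ++ PySem.List.pyRepeat [y] lim)
      ([] : List Int) (PySem.List.pyRange 0 h_ 1)
  let ys := List.foldl (fun acc y => acc ++ PySem.List.pyRepeat [y] (w - lim))
      ys ((PySem.List.pyRange 0 h_ 1).reverse)
  List.zip ys xs

-- ===== PORT B =====
-- transliteration of Source B: two loops over flat indices; divmod -> floordiv/mod
def MakeCurve_alt (w : Int) (h_ : Int) : List (Int × Int) :=
  if w ≤ 0 ∨ h_ ≤ 0 then []
  else
    let lim := PySem.Int.floordiv w 2
    let r := w - lim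
    let out := List.foldl (fun acc i =>
        acc ++ [(let y := PySem.Int.floordiv i lim
                 let x := PySem.Int.mod i lim
                 if PySem.Int.mod (h_ + y) 2 = 1 then (y, x) else (y, lim - 1 - x))])
      [] (PySem.List.pyRange 0 (h_ * lim) 1)
    List.foldl (fun acc k =>
        acc ++ [(let t := PySem.Int.floordiv k r
                 let x := PySem.Int.mod k r
                 let y := h_ - 1 - t
                 if PySem.Int.mod (h_ + y) 2 = 1 then (y, lim + x) else (y, w - 1 - x))])
      out (PySem.List.pyRange 0 (h_ * r) 1)

-- ===== PRECONDITION & SPEC =====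
def Spec_MakeCurve (w : Int) (h_ : Int) (out : List (Int × Int)) : Prop := out = MakeCurve_alt w h_
instance (w : Int) (h_ : Int) (out : List (Int × Int)) : Decidable (Spec_MakeCurve w h_ out) := by unfold Spec_MakeCurve; infer_instance

-- ===== CLAIM (what is proved, stated in full; the proofs are below) =====
def Claim_equal_MakeCurve : Prop := ∀ (w : Int) (h_ : Int), Dom_MakeCurve w h_ → Spec_MakeCurve w h_ (MakeCurve w h_)

-- ===== LEMMAS AND PROOFS =====

-- Common normal form: the curve, built row by row ((y, x) pairs), used only by the proofs.
def pvRow (h_ y lo hi : Int) : List (Int × Int) :=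
  let cols := PySem.List.pyRange lo hi 1
  let cols := if PySem.Int.mod (h_ + y) 2 = 0 then cols.reverse else cols
  List.zip (PySem.List.pyRepeat [y] (hi - lo)) cols

def pvRows (w : Int) (h_ : Int) : List (Int × Int) :=
  if w ≤ 0 ∨ h_ ≤ 0 then []
  else
    let lim := PySem.Int.floordiv w 2
    let out := List.foldl (fun acc y => acc ++ pvRow h_ y 0 lim)
        ([] : List (Int × Int)) (PySem.List.pyRange 0 h_ 1)
    let out := List.foldl (fun acc y => acc ++ pvRow h_ y lim w)
        out (PySem.List.pyRange (h_ - 1) (-1) (-1))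
    out

-- concatenation of n copies of cur, reversing between copies (the state of A's xs-loops)
def pvAltcat : Nat → List Int → List Int
  | 0, _ => []
  | n + 1, cur => cur ++ pvAltcat n cur.reverse

theorem pv_fold_altcat (l : List Int) : ∀ (acc cur : List Int),
    (List.foldl (fun (st : List Int × List Int) _ => (st.1 ++ st.2, st.2.reverse)) (acc, cur) l).1
      = acc ++ pvAltcat l.length cur := by
  induction l with
  | nil => intro acc cur; simp [pvAltcat]
  | cons a t ih => intro acc cur; simp [List.foldl_cons, ih, pvAltcat, List.append_assoc]

theorem pv_altcat_nil : ∀ n : Nat, pvAltcat n [] = [] := by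
  intro n; induction n with
  | zero => rfl
  | succ n ih => simp [pvAltcat, ih]

theorem pv_left_flat : ∀ (n : Nat) (L : List Int),
    (List.range n).flatMap (fun k => if (n + k) % 2 = 0 then L.reverse else L)
      = pvAltcat n (if n % 2 = 0 then L.reverse else L) := by
  intro n
  induction n with
  | zero => intro L; simp [pvAltcat]
  | succ n ih =>
    intro L
    rw [List.range_succ_eq_map, List.flatMap_cons, List.flatMap_map]
    have hfz : (n + 1 + 0) % 2 = (n + 1) % 2 := by omega
    have hfun : (fun k => if (n + 1 + Nat.succ k) % 2 = 0 then L.reverse else L)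
        = (fun k => if (n + k) % 2 = 0 then L.reverse else L) := by
      funext k
      have : (n + 1 + Nat.succ k) % 2 = (n + k) % 2 := by omega
      rw [this]
    rw [hfz, hfun, ih L]
    show (if (n + 1) % 2 = 0 then L.reverse else L) ++ pvAltcat n (if n % 2 = 0 then L.reverse else L)
      = pvAltcat (n + 1) (if (n + 1) % 2 = 0 then L.reverse else L)
    rw [pvAltcat]
    congr 1
    by_cases hp : n % 2 = 0
    · have : ¬ (n + 1) % 2 = 0 := by omega
      simp [hp, this]
    · have : (n + 1) % 2 = 0 := by omega
      simp [hp, this]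

theorem pv_right_flat : ∀ (n : Nat) (R : List Int),
    ((List.range n).reverse).flatMap (fun k => if (n + k) % 2 = 0 then R.reverse else R)
      = pvAltcat n R := by
  intro n
  induction n with
  | zero => intro R; simp [pvAltcat]
  | succ n ih =>
    intro R
    have hrev : (List.range (n + 1)).reverse = n :: (List.range n).reverse := by
      rw [List.range_succ, List.reverse_append]; rfl
    rw [hrev, List.flatMap_cons]
    have hfn : (n + 1 + n) % 2 = 1 := by omega
    have hfun : (fun k => if (n + 1 + k) % 2 = 0 then R.reverse else R)
        = (fun k => if (n + k) % 2 = 0 then R.reverse.reverse else R.reverse) := by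
      funext k
      by_cases hp : (n + k) % 2 = 0
      · have : ¬ (n + 1 + k) % 2 = 0 := by omega
        simp [hp, this]
      · have : (n + 1 + k) % 2 = 0 := by omega
        simp [hp, this]
    rw [hfun, ih R.reverse, pvAltcat]
    congr 1
    simp [hfn]

theorem pv_zip_rep : ∀ (l : List Int) (c : Nat) (y : Int), l.length = c →
    (List.replicate c y).zip l = l.map (fun x => (y, x)) := by
  intro l
  induction l with
  | nil => intro c y hc; subst hc; simp
  | cons a t ih =>
    intro c y hc
    subst hc
    simp only [List.length_cons, List.replicate_succ, List.zip_cons_cons, List.map_cons]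
    rw [ih t.length y rfl]

theorem pv_zip_flat : ∀ (ylist : List Int) (f : Int → List Int) (c : Nat),
    (∀ y : Int, (f y).length = c) →
    (ylist.flatMap (fun y => List.replicate c y)).zip (ylist.flatMap f)
      = ylist.flatMap (fun y => (f y).map (fun x => (y, x))) := by
  intro ylist
  induction ylist with
  | nil => intro f c hc; simp
  | cons y t ih =>
    intro f c hc
    simp only [List.flatMap_cons]
    rw [List.zip_append (by simp [hc y]), pv_zip_rep (f y) c y (hc y), ih f c hc]

theorem pv_len_flat_rep : ∀ (l : List Int) (c : Nat),
    (l.flatMap (fun y => List.replicate c y)).length = l.length * c := by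
  intro l c
  induction l with
  | nil => simp
  | cons a t ih => simp [List.flatMap_cons, ih, Nat.succ_mul, Nat.add_comm]

theorem pv_mod_two (z : Int) : PySem.Int.mod z 2 = z.emod 2 := by
  simp [PySem.Int.mod, Int.fmod_eq_emod]; rfl

theorem pv_parity (n k : Nat) : (((n : Int) + (k : Int)).emod 2 = 0) ↔ ((n + k) % 2 = 0) := by
  show (((n : Int) + (k : Int)) % 2 = 0) ↔ _
  omega

theorem pv_tdiv_facts_nonpos (w : Int) (hw : w ≤ 0) : w.tdiv 2 ≤ 0 ∧ w ≤ w.tdiv 2 := by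
  rw [Int.tdiv_eq_ediv]; simp only [show Int.sign 2 = 1 from rfl]; split_ifs <;> omega

theorem pv_tdiv_facts_pos (w : Int) (hw : 0 < w) : 0 ≤ w.tdiv 2 ∧ w.tdiv 2 < w := by
  rw [Int.tdiv_eq_ediv]; simp only [show Int.sign 2 = 1 from rfl]; split_ifs <;> omega

theorem pv_tdiv_eq_fdiv (w : Int) (hw : 0 < w) : PySem.Int.truncdiv w 2 = PySem.Int.floordiv w 2 := by
  simp only [PySem.Int.truncdiv, PySem.Int.floordiv]
  rw [Int.tdiv_eq_ediv, Int.fdiv_eq_ediv]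
  simp only [show Int.sign 2 = 1 from rfl]; split_ifs <;> omega

-- A's value, with both xs-folds resolved to pvAltcat and both ys-folds resolved to flatMaps
theorem pv_A_normal (w h_ : Int) : MakeCurve w h_ =
    List.zip
      ((PySem.List.pyRange 0 h_ 1).flatMap
          (fun y => List.replicate (PySem.Int.truncdiv w 2).toNat y)
        ++ ((PySem.List.pyRange 0 h_ 1).reverse).flatMap
          (fun y => List.replicate (w - PySem.Int.truncdiv w 2).toNat y))
      (pvAltcat h_.toNat
          (if PySem.Int.mod h_ 2 = 0
            then (PySem.List.pyRange 0 (PySem.Int.truncdiv w 2) 1).reverse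
            else PySem.List.pyRange 0 (PySem.Int.truncdiv w 2) 1)
        ++ pvAltcat h_.toNat (PySem.List.pyRange (PySem.Int.truncdiv w 2) w 1)) := by
  simp only [MakeCurve]
  rw [pv_fold_altcat, pv_fold_altcat,
    PySem.List.foldl_append_eq_flatMap, PySem.List.foldl_append_eq_flatMap]
  simp [PySem.List.pyRepeat_singleton, PySem.List.length_pyRange_one]

-- A equals the rows normal form
theorem pv_A_rows (w h_ : Int) : MakeCurve w h_ = pvRows w h_ := by
  by_cases hdeg : w ≤ 0 ∨ h_ ≤ 0
  · rw [pv_A_normal]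
    simp only [pvRows, if_pos hdeg]
    rcases hdeg with hw | hh
    · have h1 : PySem.Int.truncdiv w 2 ≤ 0 := (pv_tdiv_facts_nonpos w hw).1
      have h2 : w ≤ PySem.Int.truncdiv w 2 := (pv_tdiv_facts_nonpos w hw).2
      rw [show PySem.List.pyRange 0 (PySem.Int.truncdiv w 2) 1 = [] from
          PySem.List.pyRange_one_eq_nil h1,
        show PySem.List.pyRange (PySem.Int.truncdiv w 2) w 1 = [] from
          PySem.List.pyRange_one_eq_nil h2]
      simp [pv_altcat_nil]
    · rw [show h_.toNat = 0 by omega]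
      simp [pvAltcat]
  · push Not at hdeg
    obtain ⟨hw, hh⟩ := hdeg
    set lim := PySem.Int.truncdiv w 2 with hlimdef
    obtain ⟨hlim0, hlimw⟩ := pv_tdiv_facts_pos w hw
    have hlim0' : (0:Int) ≤ lim := hlim0
    have hlimw' : lim < w := hlimw
    set n := h_.toNat with hndef
    have hhn : h_ = (n : Int) := by omega
    set L := PySem.List.pyRange 0 lim 1 with hLdef
    set R := PySem.List.pyRange lim w 1 with hRdef
    have hLlen : L.length = lim.toNat := by
      rw [hLdef, PySem.List.length_pyRange_one]; congr 1; omega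
    have hRlen : R.length = (w - lim).toNat := by
      rw [hRdef, PySem.List.length_pyRange_one]
    set P := PySem.List.pyRange 0 h_ 1 with hPdef
    have hPcast : P = List.map (fun k : Nat => (k : Int)) (List.range n) := by
      rw [hPdef, hhn, PySem.List.pyRange_zero_natCast]
    set gL : Int → List Int := fun y => if PySem.Int.mod (h_ + y) 2 = 0 then L.reverse else L
      with hgLdef
    set gR : Int → List Int := fun y => if PySem.Int.mod (h_ + y) 2 = 0 then R.reverse else R
      with hgRdef
    have hgLlen : ∀ y : Int, (gL y).length = lim.toNat := by
      intro y
      have hy : gL y = if PySem.Int.mod (h_ + y) 2 = 0 then L.reverse else L := rfl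
      rw [hy]; split_ifs <;> simp [hLlen]
    have hgRlen : ∀ y : Int, (gR y).length = (w - lim).toNat := by
      intro y
      have hy : gR y = if PySem.Int.mod (h_ + y) 2 = 0 then R.reverse else R := rfl
      rw [hy]; split_ifs <;> simp [hRlen]
    have hxsL : pvAltcat n (if PySem.Int.mod h_ 2 = 0 then L.reverse else L) = P.flatMap gL := by
      rw [hPcast, List.flatMap_map]
      have hfun : (fun k : Nat => gL ((k : Nat) : Int))
          = (fun k : Nat => if (n + k) % 2 = 0 then L.reverse else L) := by
        funext k
        rw [hgLdef]
        simp only [hhn, pv_mod_two]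
        by_cases hp : (n + k) % 2 = 0
        · rw [if_pos ((pv_parity n k).mpr hp), if_pos hp]
        · rw [if_neg (fun hc => hp ((pv_parity n k).mp hc)), if_neg hp]
      rw [hfun, pv_left_flat n L]
      congr 1
      have : (PySem.Int.mod h_ 2 = 0) ↔ (n % 2 = 0) := by
        rw [pv_mod_two, hhn]
        have := pv_parity n 0
        simpa using this
      by_cases hp : n % 2 = 0
      · rw [if_pos (this.mpr hp), if_pos hp]
      · rw [if_neg (fun hc => hp (this.mp hc)), if_neg hp]
    have hxsR : pvAltcat n R = P.reverse.flatMap gR := by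
      rw [hPcast, ← List.map_reverse, List.flatMap_map]
      have hfun : (fun k : Nat => gR (k : Int))
          = (fun k : Nat => if (n + k) % 2 = 0 then R.reverse else R) := by
        funext k
        rw [hgRdef]
        simp only [hhn, pv_mod_two]
        by_cases hp : (n + k) % 2 = 0
        · rw [if_pos ((pv_parity n k).mpr hp), if_pos hp]
        · rw [if_neg (fun hc => hp ((pv_parity n k).mp hc)), if_neg hp]
      rw [hfun, pv_right_flat n R]
    have hrowL : ∀ y : Int, pvRow h_ y 0 lim = (gL y).map (fun x => (y, x)) := by
      intro y
      show List.zip (PySem.List.pyRepeat [y] (lim - 0)) (gL y) = _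
      rw [PySem.List.pyRepeat_singleton, show lim - 0 = lim by ring,
        pv_zip_rep (gL y) lim.toNat y (hgLlen y)]
    have hrowR : ∀ y : Int, pvRow h_ y lim w = (gR y).map (fun x => (y, x)) := by
      intro y
      show List.zip (PySem.List.pyRepeat [y] (w - lim)) (gR y) = _
      rw [PySem.List.pyRepeat_singleton, pv_zip_rep (gR y) (w - lim).toNat y (hgRlen y)]
    rw [pv_A_normal]
    simp only [pvRows, if_neg (by omega : ¬ (w ≤ 0 ∨ h_ ≤ 0))]
    rw [← pv_tdiv_eq_fdiv w hw]
    rw [PySem.List.pyRange_neg_one_eq_reverse]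
    have hrange : PySem.List.pyRange (-1 + 1) (h_ - 1 + 1) 1 = P := by
      rw [hPdef]; norm_num
    rw [hrange,
      PySem.List.foldl_append_eq_flatMap (fun y => pvRow h_ y 0 lim) P,
      PySem.List.foldl_append_eq_flatMap (fun y => pvRow h_ y lim w) P.reverse]
    show List.zip
        (P.flatMap (fun y => List.replicate lim.toNat y)
          ++ P.reverse.flatMap (fun y => List.replicate (w - lim).toNat y))
        (pvAltcat h_.toNat (if PySem.Int.mod h_ 2 = 0 then L.reverse else L)
          ++ pvAltcat h_.toNat R)
      = ([] ++ P.flatMap (fun y => pvRow h_ y 0 lim)) ++ P.reverse.flatMap (fun y => pvRow h_ y lim w)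
    rw [← hndef, hxsL, hxsR, List.nil_append]
    rw [List.zip_append (by
      rw [pv_len_flat_rep]
      rw [List.length_flatMap]
      rw [List.map_congr_left (fun y _ => hgLlen y)]
      simp [Nat.mul_comm])]
    rw [pv_zip_flat P gL lim.toNat hgLlen,
      pv_zip_flat P.reverse gR (w - lim).toNat hgRlen]
    congr 1
    · exact List.flatMap_congr (fun y _ => (hrowL y).symm)
    · exact List.flatMap_congr (fun y _ => (hrowR y).symm)

-- ===== new machinery for B = pvRows =====

theorem pv_foldl_snoc {α β : Type} (f : α → β) : ∀ (l : List α) (acc : List β),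
    List.foldl (fun acc i => acc ++ [f i]) acc l = acc ++ l.map f := by
  intro l
  induction l with
  | nil => intro acc; simp
  | cons a t ih => intro acc; simp [List.foldl_cons, ih]

theorem pv_chunk {α : Type} (g : Nat → α) (c : Nat) : ∀ n : Nat,
    (List.range (n * c)).map g
      = (List.range n).flatMap (fun y => (List.range c).map (fun j => g (y * c + j))) := by
  intro n
  induction n with
  | zero => simp
  | succ n ih =>
    rw [show (n + 1) * c = n * c + c by ring, List.range_add, List.map_append,
      List.range_succ, List.flatMap_append, ← ih]
    simp [List.map_map, Function.comp, Nat.add_comm]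

theorem pv_reverse_range (n : Nat) :
    (List.range n).reverse = (List.range n).map (fun i => n - 1 - i) := by
  apply List.ext_getElem
  · simp
  · intro i h1 h2
    rw [List.getElem_reverse]
    simp only [List.getElem_map, List.getElem_range, List.length_range]

theorem pv_fdiv_pos (a d : Int) (hd : 0 < d) : PySem.Int.floordiv a d = a / d := by
  simp only [PySem.Int.floordiv]
  rw [Int.fdiv_eq_ediv, if_pos (Or.inl hd.le)]
  ring

theorem pv_fmod_pos (a d : Int) (hd : 0 < d) : PySem.Int.mod a d = a % d := by
  simp only [PySem.Int.mod]
  rw [Int.fmod_eq_emod, if_pos (Or.inl hd.le)]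
  ring

theorem pv_divmod (y j c : Int) (h0 : 0 ≤ j) (hjc : j < c) :
    PySem.Int.floordiv (c * y + j) c = y ∧ PySem.Int.mod (c * y + j) c = j := by
  have hc : 0 < c := lt_of_le_of_lt h0 hjc
  constructor
  · rw [pv_fdiv_pos _ _ hc, add_comm, Int.add_mul_ediv_left j y (by omega),
      Int.ediv_eq_zero_of_lt h0 hjc]
    ring
  · rw [pv_fmod_pos _ _ hc, add_comm, Int.add_mul_emod_self_left,
      Int.emod_eq_of_lt h0 hjc]

-- B equals the rows normal form
theorem pv_B_rows (w h_ : Int) : MakeCurve_alt w h_ = pvRows w h_ := by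
  by_cases hdeg : w ≤ 0 ∨ h_ ≤ 0
  · simp only [MakeCurve_alt, pvRows, if_pos hdeg]
  · push Not at hdeg
    obtain ⟨hw, hh⟩ := hdeg
    simp only [MakeCurve_alt, pvRows, if_neg (by omega : ¬ (w ≤ 0 ∨ h_ ≤ 0))]
    set lim := PySem.Int.floordiv w 2 with hlimdef
    have hlim0 : 0 ≤ lim := by
      rw [hlimdef, pv_fdiv_pos w 2 (by norm_num)]; positivity
    have hlimw : lim < w := by
      rw [hlimdef, pv_fdiv_pos w 2 (by norm_num)]; omega
    set cL := lim.toNat with hcLdef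
    set cR := (w - lim).toNat with hcRdef
    have hcL : (cL : Int) = lim := by omega
    have hcR : (cR : Int) = w - lim := by omega
    set n := h_.toNat with hndef
    have hhn : h_ = (n : Int) := by omega
    set fL : Int → Int × Int := fun i =>
        (let y := PySem.Int.floordiv i lim
         let x := PySem.Int.mod i lim
         if PySem.Int.mod (h_ + y) 2 = 1 then (y, x) else (y, lim - 1 - x))
      with hfLdef
    set fR : Int → Int × Int := fun k =>
        (let t := PySem.Int.floordiv k (w - lim)
         let x := PySem.Int.mod k (w - lim)
         let y := h_ - 1 - t
         if PySem.Int.mod (h_ + y) 2 = 1 then (y, lim + x) else (y, w - 1 - x))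
      with hfRdef
    have htotL : (h_ * lim - 0).toNat = n * cL := by
      have : h_ * lim = ((n * cL : Nat) : Int) := by push_cast; rw [hcL, hhn]
      omega
    have htotR : (h_ * (w - lim) - 0).toNat = n * cR := by
      have : h_ * (w - lim) = ((n * cR : Nat) : Int) := by push_cast; rw [hcR, hhn]
      omega
    rw [pv_foldl_snoc fL (PySem.List.pyRange 0 (h_ * lim) 1) [],
      pv_foldl_snoc fR (PySem.List.pyRange 0 (h_ * (w - lim)) 1) _]
    have hmapL : (PySem.List.pyRange 0 (h_ * lim) 1).map fL
        = (List.range (n * cL)).map (fun k : Nat => fL (k : Int)) := by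
      rw [PySem.List.pyRange_one 0 (h_ * lim), htotL, List.map_map]
      apply List.map_congr_left; intro k _; simp [Function.comp]
    have hmapR : (PySem.List.pyRange 0 (h_ * (w - lim)) 1).map fR
        = (List.range (n * cR)).map (fun k : Nat => fR (k : Int)) := by
      rw [PySem.List.pyRange_one 0 (h_ * (w - lim)), htotR, List.map_map]
      apply List.map_congr_left; intro k _; simp [Function.comp]
    rw [hmapL, hmapR]
    set P := PySem.List.pyRange 0 h_ 1 with hPdef
    have hPcast : P = List.map (fun k : Nat => (k : Int)) (List.range n) := by
      rw [hPdef, hhn, PySem.List.pyRange_zero_natCast]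
    rw [PySem.List.pyRange_neg_one_eq_reverse]
    have hrange : PySem.List.pyRange (-1 + 1) (h_ - 1 + 1) 1 = P := by
      rw [hPdef]; norm_num
    rw [hrange,
      PySem.List.foldl_append_eq_flatMap (fun y => pvRow h_ y 0 lim) P,
      PySem.List.foldl_append_eq_flatMap (fun y => pvRow h_ y lim w) P.reverse,
      List.nil_append, List.nil_append]
    congr 1
    -- ===== left half =====
    · rw [pv_chunk (fun k : Nat => fL (k : Int)) cL n, hPcast, List.flatMap_map]
      apply List.flatMap_congr
      intro y hy
      have hyn : y < n := List.mem_range.mp hy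
      have hval : ∀ j, j < cL → fL ((y * cL + j : Nat) : Int)
          = if PySem.Int.mod (h_ + (y : Int)) 2 = 1 then ((y : Int), (j : Int))
            else ((y : Int), lim - 1 - (j : Int)) := by
        intro j hj
        have hjlim : (j : Int) < lim := by omega
        have hcast : ((y * cL + j : Nat) : Int) = lim * (y : Int) + (j : Int) := by
          rw [← hcL]; push_cast; ring
        obtain ⟨hdiv, hmod⟩ := pv_divmod (y : Int) (j : Int) lim (by positivity) hjlim
        simp only [hfLdef]
        rw [hcast, hdiv, hmod]
      have hL : PySem.List.pyRange 0 lim 1 = (List.range cL).map (fun j : Nat => (j : Int)) := by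
        rw [PySem.List.pyRange_one 0 lim]
        simp only [Int.sub_zero, ← hcLdef]
        apply List.map_congr_left
        intro j _
        omega
      have hrow : pvRow h_ (y : Int) 0 lim
          = (if PySem.Int.mod (h_ + (y : Int)) 2 = 0
              then ((List.range cL).map (fun j : Nat => (j : Int))).reverse
              else (List.range cL).map (fun j : Nat => (j : Int))).map
              (fun x => ((y : Int), x)) := by
        show List.zip (PySem.List.pyRepeat [(y : Int)] (lim - 0)) _ = _
        rw [PySem.List.pyRepeat_singleton, show lim - 0 = lim by ring, hL]
        rw [pv_zip_rep _ cL _ (by split_ifs <;> simp)]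
      rw [hrow]
      rcases Int.emod_two_eq_zero_or_one (h_ + (y : Int)) with hm | hm
      · have hm0 : PySem.Int.mod (h_ + (y : Int)) 2 = 0 := by rw [pv_mod_two]; exact hm
        rw [if_pos hm0, ← List.map_reverse, pv_reverse_range, List.map_map, List.map_map]
        apply List.map_congr_left
        intro j hj
        have hjc : j < cL := List.mem_range.mp hj
        rw [hval j hjc, if_neg (by rw [hm0]; norm_num)]
        simp only [Function.comp_apply]
        congr 1
        omega
      · have hm1 : PySem.Int.mod (h_ + (y : Int)) 2 = 1 := by rw [pv_mod_two]; exact hm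
        rw [if_neg (by rw [hm1]; norm_num), List.map_map]
        apply List.map_congr_left
        intro j hj
        rw [hval j (List.mem_range.mp hj), if_pos hm1]
        simp [Function.comp]
    -- ===== right half =====
    · rw [pv_chunk (fun k : Nat => fR (k : Int)) cR n, hPcast,
        ← List.map_reverse, pv_reverse_range, List.map_map, List.flatMap_map]
      apply List.flatMap_congr
      intro t ht
      have htn : t < n := List.mem_range.mp ht
      have hval : ∀ j, j < cR → fR ((t * cR + j : Nat) : Int)
          = if PySem.Int.mod (h_ + (h_ - 1 - (t : Int))) 2 = 1
            then (h_ - 1 - (t : Int), lim + (j : Int))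
            else (h_ - 1 - (t : Int), w - 1 - (j : Int)) := by
        intro j hj
        have hjr : (j : Int) < w - lim := by omega
        have hcast : ((t * cR + j : Nat) : Int) = (w - lim) * (t : Int) + (j : Int) := by
          rw [← hcR]; push_cast; ring
        obtain ⟨hdiv, hmod⟩ := pv_divmod (t : Int) (j : Int) (w - lim) (by positivity) hjr
        simp only [hfRdef]
        rw [hcast, hdiv, hmod]
      have hR : PySem.List.pyRange lim w 1 = (List.range cR).map (fun j : Nat => lim + (j : Int)) := by
        rw [PySem.List.pyRange_one lim w, ← hcRdef]
      have hrow : pvRow h_ (h_ - 1 - (t : Int)) lim w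
          = (if PySem.Int.mod (h_ + (h_ - 1 - (t : Int))) 2 = 0
              then ((List.range cR).map (fun j : Nat => lim + (j : Int))).reverse
              else (List.range cR).map (fun j : Nat => lim + (j : Int))).map
              (fun x => ((h_ - 1 - (t : Int)), x)) := by
        show List.zip (PySem.List.pyRepeat [(h_ - 1 - (t : Int))] (w - lim)) _ = _
        rw [PySem.List.pyRepeat_singleton, hR]
        rw [pv_zip_rep _ cR _ (by split_ifs <;> simp)]
      simp only [Function.comp_apply]
      rw [show ((n - 1 - t : Nat) : Int) = h_ - 1 - (t : Int) by omega, hrow]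
      rcases Int.emod_two_eq_zero_or_one (h_ + (h_ - 1 - (t : Int))) with hm | hm
      · have hm0 : PySem.Int.mod (h_ + (h_ - 1 - (t : Int))) 2 = 0 := by
          rw [pv_mod_two]; exact hm
        rw [if_pos hm0, ← List.map_reverse, pv_reverse_range, List.map_map, List.map_map]
        apply List.map_congr_left
        intro j hj
        have hjc : j < cR := List.mem_range.mp hj
        rw [hval j hjc, if_neg (by rw [hm0]; norm_num)]
        simp only [Function.comp_apply]
        congr 1
        omega
      · have hm1 : PySem.Int.mod (h_ + (h_ - 1 - (t : Int))) 2 = 1 := by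
          rw [pv_mod_two]; exact hm
        rw [if_neg (by rw [hm1]; norm_num), List.map_map]
        apply List.map_congr_left
        intro j hj
        rw [hval j (List.mem_range.mp hj), if_pos hm1]
        simp [Function.comp]

theorem pv_main (w h_ : Int) : MakeCurve w h_ = MakeCurve_alt w h_ := by
  rw [pv_A_rows, pv_B_rows]

-- ===== VERDICT (by name: the statement is the Claim_ definition above) =====
theorem MakeCurve_spec : Claim_equal_MakeCurve := by
  intro w h_ _
  unfold Spec_MakeCurve
  exact pv_main w h_
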